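-- pv_equiv track=rewrite | github.com/AlexRemstedt/advent_of_code | day_4.py | list_fixer
-- ===== SOURCE A (Python) =====
-- def list_fixer(broken_list):
-- 	"""
-- 	list_fixer fixes the broken_list.
-- 	:param broken_list: a list consisting of string-parts broken up by empty strings.
-- 	:return: a list with only full strings.
-- 	"""
-- 	fixed_list = []  # Empty list which shall be returned
-- 	indices = break_finder(broken_list)
-- 	for cluster in range(len(indices) - 1):
-- 		# For loop variables
-- 		broken_line = ''  # Empty string
--
-- 		# For loop which looks at the lines within the clusters.
-- 		for line in range(indices[cluster] + 1, indices[cluster + 1]):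
-- 			broken_line += broken_list[line] + ' '  # Adds broken_line-part to broken_line
--
-- 		fixed_list.append(broken_line)  # append string (now full) to fixed list.
-- 	return fixed_list
--
-- def break_finder(broken_list):
-- 	"""
-- 	break_finder takes a broken list an
-- 	:param broken_list: a list which contains strings, seperated by ''.
-- 	:return breaks: list with proper string, seperated by comma's
-- 	"""
-- 	# Function variables
-- 	broken_lines = [-1, len(broken_list)]  # List with the indices of all the breakpoints, index -1 is the first breakline.
--
-- 	# Finds index of where broken list is broken and appends index to broken_lines
-- 	for idx, line in enumerate(broken_list):
-- 		if line == '':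
-- 			broken_lines.append(idx)
--
-- 	broken_lines.sort()  # Sorts the indexes
-- 	return broken_lines
-- ===== SOURCE B (Python) =====
-- def list_fixer(broken_list):
--     """Single linear pass with a running buffer instead of index bookkeeping."""
--     fixed_list = []
--     buffer = ''
--     for element in broken_list:
--         if element == '':
--             fixed_list.append(buffer)
--             buffer = ''
--         else:
--             buffer += element + ' '
--     fixed_list.append(buffer)
--     return fixed_list
-- ===== Notes on version B (the rewrite author's own statement) =====
-- stated objective: simpler
-- what changed: Replaced break_finder's index collection, sort, and nested range-indexed loops by one linear pass that flushes a running buffer at each empty string (and once at the end).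
import Mathlib
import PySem

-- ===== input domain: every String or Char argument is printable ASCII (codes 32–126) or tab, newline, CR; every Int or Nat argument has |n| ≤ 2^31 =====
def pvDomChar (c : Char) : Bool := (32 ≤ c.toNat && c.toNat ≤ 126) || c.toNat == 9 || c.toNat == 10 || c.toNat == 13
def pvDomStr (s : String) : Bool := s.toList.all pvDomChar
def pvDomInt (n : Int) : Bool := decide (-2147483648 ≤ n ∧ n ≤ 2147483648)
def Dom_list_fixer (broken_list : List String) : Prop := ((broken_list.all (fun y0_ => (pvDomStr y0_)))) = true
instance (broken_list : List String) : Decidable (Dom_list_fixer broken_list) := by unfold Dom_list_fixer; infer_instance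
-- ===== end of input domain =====

-- B replaces A's collect-breakpoints/sort/nested-index-loops scheme by a single
-- linear pass with a running buffer (simpler decomposition, same results).

-- ===== PORT A =====
-- literal port of break_finder: [-1, len] plus the indices of '' elements, then sorted
def break_finder (broken_list : List String) : List Int :=
  PySem.List.sorted
    ((PySem.List.enumerate broken_list 0).foldl
        (fun acc p => if p.2 = "" then acc ++ [p.1] else acc)
        [-1, (broken_list.length : Int)])
    (fun x => x) false

-- literal port of list_fixer: for each consecutive pair of breakpoints, join the
-- elements strictly between them (each followed by a space); indices stay in range,
-- so broken_list[line] is ported with pyGetD.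
def list_fixer (broken_list : List String) : List String :=
  let indices := break_finder broken_list
  (PySem.List.pyRange 0 ((indices.length : Int) - 1) 1).foldl
    (fun fixed cluster =>
      -- broken_line is Python's inner accumulation, written inline
      fixed ++
        [(PySem.List.pyRange (PySem.List.pyGetD indices cluster 0 + 1)
              (PySem.List.pyGetD indices (cluster + 1) 0) 1).foldl
            (fun bl line => bl ++ PySem.List.pyGetD broken_list line "" ++ " ") ""]) []

-- ===== PORT B =====
def list_fixer_alt (broken_list : List String) : List String :=
  let st := broken_list.foldl
    (fun (st : List String × String) element =>
      if element = "" then (st.1 ++ [st.2], "") else (st.1, st.2 ++ element ++ " "))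
    ([], "")
  st.1 ++ [st.2]

-- ===== PRECONDITION & SPEC =====
def Spec_list_fixer (broken_list : List String) (out : List String) : Prop := out = list_fixer_alt broken_list
instance (broken_list : List String) (out : List String) : Decidable (Spec_list_fixer broken_list out) := by unfold Spec_list_fixer; infer_instance

-- ===== CLAIM (what is proved, stated in full; the proofs are below) =====
def Claim_equal_list_fixer : Prop := ∀ (broken_list : List String), Dom_list_fixer broken_list → Spec_list_fixer broken_list (list_fixer broken_list)

-- ===== LEMMAS AND PROOFS =====

-- reference recursion both ports are reduced to
def bfix : List String → String → List String
  | [], buf => [buf]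
  | x :: t, buf => if x = "" then buf :: bfix t "" else bfix t (buf ++ x ++ " ")

-- positions (starting at s) of the empty strings in a list
def eIdxFrom : List String → Int → List Int
  | [], _ => []
  | x :: t, s => (if x = "" then [s] else []) ++ eIdxFrom t (s + 1)

-- consecutive pairs (p, y0), (y0, y1), …
def apairs : Int → List Int → List (Int × Int)
  | _, [] => []
  | p, y :: ys => (p, y) :: apairs y ys

-- the inner joining loop of A
def segJoin (l : List String) (a b : Int) : String :=
  (PySem.List.pyRange a b 1).foldl
    (fun bl j => bl ++ PySem.List.pyGetD l j "" ++ " ") ""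

-- ---- B side ----
lemma alt_foldl (l : List String) : ∀ (st : List String × String),
    (let r := l.foldl
      (fun (st : List String × String) element =>
        if element = "" then (st.1 ++ [st.2], "") else (st.1, st.2 ++ element ++ " ")) st
     r.1 ++ [r.2]) = st.1 ++ bfix l st.2 := by
  induction l with
  | nil => intro st; simp [bfix]
  | cons x t ih =>
      intro st
      by_cases hx : x = ""
      · simp [bfix, hx, ih]
      · simp [bfix, hx, ih]

lemma alt_eq_bfix (l : List String) : list_fixer_alt l = bfix l "" := by
  simpa [list_fixer_alt] using alt_foldl l ([], "")

-- ---- A side: break_finder characterisation ----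
lemma enum_fold (l : List String) : ∀ (s : Int) (acc : List Int),
    (PySem.List.enumerate l s).foldl
      (fun acc p => if p.2 = "" then acc ++ [p.1] else acc) acc
    = acc ++ eIdxFrom l s := by
  induction l with
  | nil => intro s acc; simp [PySem.List.enumerate, eIdxFrom]
  | cons x t ih =>
      intro s acc
      rw [PySem.List.enumerate_cons]
      by_cases hx : x = "" <;> simp [hx, eIdxFrom, ih]

lemma eIdx_bounds (l : List String) : ∀ (s : Int), ∀ x ∈ eIdxFrom l s, s ≤ x ∧ x < s + l.length := by
  induction l with
  | nil => intro s x hx; simp [eIdxFrom] at hx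
  | cons y t ih =>
      intro s x hx
      simp only [List.length_cons]
      by_cases hy : y = "" <;> simp [eIdxFrom, hy] at hx
      · rcases hx with rfl | hx
        · push_cast; omega
        · have := ih (s + 1) x hx; push_cast; omega
      · have := ih (s + 1) x hx; push_cast; omega

lemma eIdx_pairwise (l : List String) : ∀ (s : Int), (eIdxFrom l s).Pairwise (· < ·) := by
  induction l with
  | nil => intro s; simp [eIdxFrom]
  | cons y t ih =>
      intro s
      by_cases hy : y = "" <;> simp [eIdxFrom, hy]
      · refine ⟨fun x hx => ?_, ih (s + 1)⟩
        have := eIdx_bounds t (s + 1) x hx; omega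
      · exact ih (s + 1)

lemma break_finder_eq (l : List String) :
    break_finder l = -1 :: (eIdxFrom l 0 ++ [(l.length : Int)]) := by
  unfold break_finder
  rw [enum_fold]
  apply PySem.List.sorted_eq_of_perm_of_pairwise_lt
  · show (-1 :: (eIdxFrom l 0 ++ [(l.length : Int)])).Perm ([-1, (l.length : Int)] ++ eIdxFrom l 0)
    refine List.Perm.cons _ ?_
    exact List.perm_append_singleton _ _
  · refine List.pairwise_cons.2 ⟨?_, ?_⟩
    · intro y hy
      simp at hy
      rcases hy with hy | rfl
      · have := eIdx_bounds l 0 y hy; omega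
      · omega
    · rw [List.pairwise_append]
      refine ⟨eIdx_pairwise l 0, by simp, ?_⟩
      intro a ha b hb
      simp at hb; subst hb
      have := eIdx_bounds l 0 a ha; omega

-- ---- shift machinery ----
lemma pyRange_succ_shift (a b : Int) :
    PySem.List.pyRange (a + 1) (b + 1) 1 = (PySem.List.pyRange a b 1).map (· + 1) := by
  rw [PySem.List.pyRange_one, PySem.List.pyRange_one]
  have : (b + 1 - (a + 1)) = b - a := by ring
  rw [this, List.map_map]
  exact List.map_congr_left (fun k _ => by simp; ring)

lemma pyGetD_cons_succ {α : Type} (x : α) (xs : List α) (c : Int) (d : α) (hc : 0 ≤ c) :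
    PySem.List.pyGetD (x :: xs) (c + 1) d = PySem.List.pyGetD xs c d := by
  obtain ⟨m, rfl⟩ := Int.eq_ofNat_of_zero_le hc
  have : ((m : Int) + 1) = ((m + 1 : Nat) : Int) := by push_cast; ring
  rw [this, PySem.List.pyGetD_natCast, PySem.List.pyGetD_natCast]
  rfl

-- pull the initial buffer out of the joining fold
lemma foldl_str_init (g : Int → String) (js : List Int) : ∀ (s : String),
    js.foldl (fun acc j => acc ++ g j ++ " ") s
    = s ++ js.foldl (fun acc j => acc ++ g j ++ " ") "" := by
  induction js with
  | nil => intro s; simp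
  | cons j t ih =>
      intro s
      simp only [List.foldl_cons]
      rw [ih (s ++ g j ++ " "), ih ("" ++ g j ++ " ")]
      simp [String.append_assoc]

lemma segJoin_shift (x : String) (t : List String) (a b : Int) (ha : 0 ≤ a) :
    segJoin (x :: t) (a + 1) (b + 1) = segJoin t a b := by
  unfold segJoin
  rw [pyRange_succ_shift, List.foldl_map]
  exact PySem.List.foldl_congr_mem _ _ _ _ (fun acc j hj => by
    have := PySem.List.mem_pyRange_one.1 hj
    rw [pyGetD_cons_succ x t j _ (by omega)])

-- the outer cluster loop is a map over consecutive breakpoint pairs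
lemma outer_fold (F : Int → Int → String) (ys : List Int) : ∀ (p : Int) (acc : List String),
    (PySem.List.pyRange 0 (((p :: ys).length : Int) - 1) 1).foldl
      (fun fixed c =>
        fixed ++ [F (PySem.List.pyGetD (p :: ys) c 0) (PySem.List.pyGetD (p :: ys) (c + 1) 0)]) acc
    = acc ++ (apairs p ys).map (fun q => F q.1 q.2) := by
  induction ys with
  | nil => intro p acc; simp [apairs, PySem.List.pyRange_one_eq_nil]
  | cons q rest ih =>
      intro p acc
      have hlen : (((p :: q :: rest).length : Int) - 1) = ((rest.length : Int) + 1) := by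
        push_cast [List.length_cons]; ring
      rw [hlen, PySem.List.pyRange_one_cons (by positivity)]
      simp only [List.foldl_cons]
      have h0 : PySem.List.pyGetD (p :: q :: rest) 0 0 = p := PySem.List.pyGetD_zero_cons _ _ _
      have h1 : PySem.List.pyGetD (p :: q :: rest) (0 + 1) 0 = q := by
        rw [pyGetD_cons_succ _ _ 0 0 le_rfl, PySem.List.pyGetD_zero_cons]
      rw [h0, h1]
      have hsh : PySem.List.pyRange (0 + 1) ((rest.length : Int) + 1) 1
          = (PySem.List.pyRange 0 (rest.length : Int) 1).map (· + 1) :=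
        pyRange_succ_shift 0 (rest.length : Int)
      rw [hsh, List.foldl_map]
      rw [PySem.List.foldl_congr_mem _ _
        (fun fixed c =>
          fixed ++ [F (PySem.List.pyGetD (q :: rest) c 0) (PySem.List.pyGetD (q :: rest) (c + 1) 0)]) _
        (fun acc' c hc => by
          have hcb := PySem.List.mem_pyRange_one.1 hc
          rw [pyGetD_cons_succ _ _ c 0 (by omega),
              show c + 1 + 1 = (c + 1) + 1 by ring,
              pyGetD_cons_succ _ _ (c + 1) 0 (by omega)])]
      have := ih q (acc ++ [F p q])
      simp only [List.length_cons] at this ⊢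
      rw [show ((rest.length : Int)) = (((rest.length + 1 : Nat) : Int) - 1) by push_cast; ring]
      rw [this]
      simp [apairs]

lemma A_eq_map (l : List String) :
    list_fixer l
    = (apairs (-1) (eIdxFrom l 0 ++ [(l.length : Int)])).map
        (fun q => segJoin l (q.1 + 1) q.2) := by
  simp only [list_fixer, break_finder_eq]
  rw [outer_fold
    (fun a b =>
      (PySem.List.pyRange (a + 1) b 1).foldl
        (fun bl line => bl ++ PySem.List.pyGetD l line "" ++ " ") "")
    (eIdxFrom l 0 ++ [(l.length : Int)]) (-1) []]
  simp only [List.nil_append]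
  rfl

-- ---- apairs lemmas ----
lemma apairs_map_shift (ys : List Int) : ∀ (p : Int),
    apairs (p + 1) (ys.map (· + 1)) = (apairs p ys).map (fun q => (q.1 + 1, q.2 + 1)) := by
  induction ys with
  | nil => intro p; simp [apairs]
  | cons y t ih => intro p; simp [apairs, ih y]

lemma apairs_fst_mem (ys : List Int) : ∀ (p : Int) (q : Int × Int), q ∈ apairs p ys → q.1 ∈ p :: ys := by
  induction ys with
  | nil => intro p q hq; simp [apairs] at hq
  | cons y t ih =>
      intro p q hq
      simp [apairs] at hq
      rcases hq with rfl | hq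
      · simp
      · have := ih y q hq; simp at this ⊢; tauto

-- ---- buffer shift for bfix ----
lemma bfix_buf (t : List String) : ∀ (b c : String),
    bfix t (b ++ c) = (b ++ (bfix t c).headI) :: (bfix t c).tail := by
  induction t with
  | nil => intro b c; simp [bfix]
  | cons x r ih =>
      intro b c
      by_cases hx : x = ""
      · simp [bfix, hx]
      · simp only [bfix, if_neg hx]
        rw [show b ++ c ++ x ++ " " = b ++ (c ++ x ++ " ") by simp [String.append_assoc]]
        exact ih b (c ++ x ++ " ")

lemma eIdx_shift (t : List String) : ∀ (s : Int), eIdxFrom t (s + 1) = (eIdxFrom t s).map (· + 1) := by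
  induction t with
  | nil => intro s; simp [eIdxFrom]
  | cons y r ih =>
      intro s
      by_cases hy : y = "" <;> simp [eIdxFrom, hy, ih (s + 1)]

lemma ys_cons (x : String) (t : List String) :
    eIdxFrom (x :: t) 0 ++ [(((x :: t).length : Int))]
    = (if x = "" then [(0 : Int)] else [])
        ++ (eIdxFrom t 0 ++ [(t.length : Int)]).map (· + 1) := by
  have h1 : eIdxFrom t 1 = (eIdxFrom t 0).map (· + 1) := by
    simpa using eIdx_shift t 0
  by_cases hx : x = "" <;> simp [eIdxFrom, hx, h1, List.length_cons]

-- nonnegativity of the breakpoint tail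
lemma ys_nonneg (l : List String) (y : Int) (hy : y ∈ eIdxFrom l 0 ++ [(l.length : Int)]) : 0 ≤ y := by
  simp at hy
  rcases hy with hy | rfl
  · exact (eIdx_bounds l 0 y hy).1
  · positivity

-- ---- main: the pair map equals bfix ----
lemma map_eq_bfix (l : List String) :
    (apairs (-1) (eIdxFrom l 0 ++ [(l.length : Int)])).map
        (fun q => segJoin l (q.1 + 1) q.2) = bfix l "" := by
  induction l with
  | nil => simp [eIdxFrom, apairs, bfix, segJoin, PySem.List.pyRange_one_eq_nil]
  | cons x t ih =>
      rw [ys_cons]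
      by_cases hx : x = ""
      · subst hx
        simp only [if_true, List.singleton_append, apairs, List.map_cons]
        have hsh : apairs 0 ((eIdxFrom t 0 ++ [(t.length : Int)]).map (· + 1))
            = (apairs (-1) (eIdxFrom t 0 ++ [(t.length : Int)])).map
                (fun q => (q.1 + 1, q.2 + 1)) := by
          have h := apairs_map_shift (eIdxFrom t 0 ++ [(t.length : Int)]) (-1)
          rw [show (-1 : Int) + 1 = 0 by ring] at h
          exact h
        rw [hsh, List.map_map]
        have hhead : segJoin ("" :: t) ((-1) + 1) 0 = "" := by
          rw [show (-1 : Int) + 1 = 0 by ring]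
          simp [segJoin, PySem.List.pyRange_one_eq_nil]
        rw [hhead]
        have htail : ((apairs (-1) (eIdxFrom t 0 ++ [(t.length : Int)])).map
            ((fun q : Int × Int => segJoin ("" :: t) (q.1 + 1) q.2) ∘
              fun q => (q.1 + 1, q.2 + 1)))
            = bfix t "" := by
          rw [← ih]
          apply List.map_congr_left
          intro q hq
          have h1 := apairs_fst_mem _ (-1) q hq
          have h2 : -1 ≤ q.1 := by
            rcases List.mem_cons.1 h1 with h | h
            · omega
            · have := ys_nonneg t q.1 h; omega
          show segJoin ("" :: t) (q.1 + 1 + 1) (q.2 + 1) = segJoin t (q.1 + 1) q.2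
          exact segJoin_shift "" t (q.1 + 1) q.2 (by omega)
        rw [htail]
        simp [bfix]
      · rcases hM : eIdxFrom t 0 ++ [(t.length : Int)] with _ | ⟨y0, rest⟩
        · exact absurd hM (by simp)
        · have hy0 : 0 ≤ y0 := ys_nonneg t y0 (by rw [hM]; exact List.mem_cons_self)
          simp only [if_neg hx, List.nil_append, List.map_cons, apairs]
          have hsh : apairs (y0 + 1) (rest.map (· + 1))
              = (apairs y0 rest).map (fun q => (q.1 + 1, q.2 + 1)) :=
            apairs_map_shift rest y0
          rw [hsh, List.map_map]
          -- head: join of the first cluster of (x :: t)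
          have hhead : segJoin (x :: t) ((-1) + 1) (y0 + 1)
              = ("" ++ x ++ " ") ++ segJoin t 0 y0 := by
            rw [show (-1 : Int) + 1 = 0 by ring]
            unfold segJoin
            rw [PySem.List.pyRange_one_cons (by omega)]
            simp only [List.foldl_cons, PySem.List.pyGetD_zero_cons]
            rw [pyRange_succ_shift 0 y0, List.foldl_map]
            rw [PySem.List.foldl_congr_mem _ _
              (fun bl j => bl ++ PySem.List.pyGetD t j "" ++ " ") _
              (fun acc' j hj => by
                have := PySem.List.mem_pyRange_one.1 hj
                rw [pyGetD_cons_succ _ _ j _ (by omega)])]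
            exact foldl_str_init (fun j => PySem.List.pyGetD t j "") _ _
          rw [hhead]
          -- tail: shift every later cluster into t
          have htail : ((apairs y0 rest).map
              ((fun q : Int × Int => segJoin (x :: t) (q.1 + 1) q.2) ∘
                fun q => (q.1 + 1, q.2 + 1)))
              = (apairs y0 rest).map (fun q => segJoin t (q.1 + 1) q.2) := by
            apply List.map_congr_left
            intro q hq
            have h1 := apairs_fst_mem _ y0 q hq
            have h2 : 0 ≤ q.1 := by
              rcases List.mem_cons.1 h1 with h | h
              · omega
              · exact ys_nonneg t q.1 (by rw [hM]; exact List.mem_cons_of_mem _ h)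
            show segJoin (x :: t) (q.1 + 1 + 1) (q.2 + 1) = segJoin t (q.1 + 1) q.2
            exact segJoin_shift x t (q.1 + 1) q.2 (by omega)
          rw [htail]
          -- right-hand side via the buffer-shift lemma and the IH
          have hIH := ih
          rw [hM] at hIH
          simp only [apairs, List.map_cons] at hIH
          have hrhs : bfix (x :: t) ""
              = (("" ++ x ++ " ") ++ segJoin t ((-1) + 1) y0)
                  :: (apairs y0 rest).map (fun q => segJoin t (q.1 + 1) q.2) := by
            have hb : bfix (x :: t) "" = bfix t ("" ++ x ++ " ") := by
              simp [bfix, hx]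
            rw [hb, show ("" ++ x ++ " ") = ("" ++ x ++ " ") ++ "" by rw [String.append_empty],
              bfix_buf, ← hIH]
            simp
          rw [hrhs, show (-1 : Int) + 1 = 0 by ring]

lemma main_eq (l : List String) : list_fixer l = list_fixer_alt l := by
  rw [A_eq_map, map_eq_bfix, alt_eq_bfix]

-- ===== VERDICT (by name: the statement is the Claim_ definition above) =====
theorem list_fixer_spec : Claim_equal_list_fixer := by
  intro l _
  show list_fixer l = list_fixer_alt l
  exact main_eq l
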